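-- pv_equiv track=rewrite | github.com/JeffHemmen/AoC-2019 | Day 8/day8.py | read_layers
-- ===== SOURCE A (Python) =====
-- from operator import mul
--
-- def read_layers(dimensions, code):
--     assert len(code) % mul(*dimensions) == 0
--     # num_layers = len(code) // mul(*dimensions)
--     it_code = iter(code)
--     layers = []
--     try:
--         while True:
--             this_layer = []
--             for row in range(dimensions[1]):
--                 this_row = []
--                 for col in range(dimensions[0]):
--                     this_row.append(next(it_code))
--                 this_layer.append(this_row)
--             layers.append(this_layer)
--     except StopIteration:
--             return layers
-- ===== SOURCE B (Python) =====
-- def read_layers(dimensions, code):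
--     width, height = dimensions
--     layer_size = width * height
--     assert len(code) % layer_size == 0
--     num_layers = len(code) // layer_size
--     return [
--         [list(code[l * layer_size + r * width : l * layer_size + r * width + width])
--          for r in range(height)]
--         for l in range(num_layers)
--     ]
-- ===== Notes on version B (the rewrite author's own statement) =====
-- stated objective: simpler
-- what changed: B computes num_layers = len(code)//(width*height) up front and builds the result with nested comprehensions slicing the flat list at computed offsets, instead of A's while-True loop pulling one element at a time through an iterator and terminating via StopIteration.
import Mathlib
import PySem

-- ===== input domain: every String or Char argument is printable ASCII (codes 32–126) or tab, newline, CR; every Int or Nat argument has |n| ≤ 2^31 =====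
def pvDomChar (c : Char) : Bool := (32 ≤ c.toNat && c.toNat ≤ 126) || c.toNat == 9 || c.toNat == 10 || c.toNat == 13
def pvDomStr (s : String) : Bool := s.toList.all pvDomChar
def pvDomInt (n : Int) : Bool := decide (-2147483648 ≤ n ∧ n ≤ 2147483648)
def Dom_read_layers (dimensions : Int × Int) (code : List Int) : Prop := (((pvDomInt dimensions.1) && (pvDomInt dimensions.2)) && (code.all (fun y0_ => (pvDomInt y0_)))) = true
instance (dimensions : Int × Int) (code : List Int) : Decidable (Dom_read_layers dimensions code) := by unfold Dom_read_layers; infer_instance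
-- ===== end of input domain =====

-- B reshapes by computed offsets with nested comprehensions and slicing, instead of A's
-- one-character-at-a-time iterator with a StopIteration-terminated infinite loop (objective: simpler).

-- ===== PORT A =====
-- 'for col in range(dimensions[0]): this_row.append(next(it_code))'; none = StopIteration mid-row
def pvRowA (w : Int) (rest : List Int) : Option (List Int × List Int) :=
  (PySem.List.pyRange 0 w 1).foldl
    (fun st _ =>
      match st with
      | none => none
      | some (row, rem) =>
        match rem with
        | [] => none
        | x :: rs => some (row ++ [x], rs))
    (some ([], rest))

-- 'for row in range(dimensions[1]): … this_layer.append(this_row)'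
def pvLayerA (w h : Int) (rest : List Int) : Option (List (List Int) × List Int) :=
  (PySem.List.pyRange 0 h 1).foldl
    (fun st _ =>
      match st with
      | none => none
      | some (layer, rem) =>
        match pvRowA w rem with
        | none => none
        | some (row, rem') => some (layer ++ [row], rem'))
    (some ([], rest))

-- the 'while True' loop; fuel (code.length + 1) only makes it total — inside Pre_ it is never exhausted
def pvLoopA (fuel : Nat) (w h : Int) (rest : List Int) (layers : List (List (List Int))) : List (List (List Int)) :=
  match fuel with
  | 0 => layers
  | fuel + 1 =>
    match pvLayerA w h rest with
    | none => layers
    | some (layer, rest') => pvLoopA fuel w h rest' (layers ++ [layer])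

def read_layers (dimensions : Int × Int) (code : List Int) : List (List (List Int)) :=
  pvLoopA (code.length + 1) dimensions.1 dimensions.2 code []

-- ===== PORT B =====
def read_layers_alt (dimensions : Int × Int) (code : List Int) : List (List (List Int)) :=
  let width := dimensions.1
  let height := dimensions.2
  let layerSize := width * height
  let numLayers := PySem.Int.floordiv (code.length : Int) layerSize
  (PySem.List.pyRange 0 numLayers 1).map (fun l =>
    (PySem.List.pyRange 0 height 1).map (fun r =>
      PySem.List.slice code (some (l * layerSize + r * width)) (some (l * layerSize + r * width + width))))

-- ===== PRECONDITION & SPEC =====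
-- Pre_ excludes exactly where A does not return: ZeroDivisionError (width*height = 0),
-- AssertionError (length not divisible by width*height), and divergence (a negative or zero dimension
-- with nonzero area, where A's ranges consume nothing and the while-True loop never ends).
def Pre_read_layers (dimensions : Int × Int) (code : List Int) : Prop :=
  0 < dimensions.1 ∧ 0 < dimensions.2 ∧
  PySem.Int.mod (code.length : Int) (dimensions.1 * dimensions.2) = 0
instance (dimensions : Int × Int) (code : List Int) : Decidable (Pre_read_layers dimensions code) := by unfold Pre_read_layers; infer_instance

def pvWitness_read_layers : (Int × Int) × List Int := ((2, 3), [1, 2, 3, 4, 5, 6])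

def Spec_read_layers (dimensions : Int × Int) (code : List Int) (out : List (List (List Int))) : Prop := out = read_layers_alt dimensions code
instance (dimensions : Int × Int) (code : List Int) (out : List (List (List Int))) : Decidable (Spec_read_layers dimensions code out) := by unfold Spec_read_layers; infer_instance

-- ===== CLAIM (what is proved, stated in full; the proofs are below) =====
def Claim_equal_read_layers : Prop := ∀ (dimensions : Int × Int) (code : List Int), Dom_read_layers dimensions code → Pre_read_layers dimensions code → Spec_read_layers dimensions code (read_layers dimensions code)

-- ===== LEMMAS AND PROOFS =====

-- canonical chunking both ports are proved equal to
def rowsC (wn : Nat) : Nat → List Int → List (List Int)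
  | 0, _ => []
  | hh + 1, rest => rest.take wn :: rowsC wn hh (rest.drop wn)

def chunksC (wn hn : Nat) : Nat → List Int → List (List (List Int))
  | 0, _ => []
  | k + 1, rest => rowsC wn hn rest :: chunksC wn hn k (rest.drop (wn * hn))

lemma rowFold_none {α : Type} (step : Option α → Int → Option α)
    (hstep : ∀ a, step none a = none) (l : List Int) : l.foldl step none = none := by
  induction l with
  | nil => rfl
  | cons a l ih => simp [List.foldl, hstep, ih]

lemma rowA_fold (l : List Int) : ∀ (row rest : List Int),
    l.foldl
      (fun st _ =>
        match st with
        | none => none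
        | some (row, rem) =>
          match rem with
          | [] => none
          | x :: rs => some (row ++ [x], rs))
      (some (row, rest)) =
    if l.length ≤ rest.length then some (row ++ rest.take l.length, rest.drop l.length) else none := by
  induction l with
  | nil => intro row rest; simp
  | cons a l ih =>
    intro row rest
    cases rest with
    | nil =>
      simp only [List.foldl]
      rw [rowFold_none _ (fun a => rfl)]
      simp
    | cons x rs =>
      simp only [List.foldl]
      rw [ih]
      by_cases h : l.length ≤ rs.length
      · simp [h, Nat.succ_le_succ h, List.append_assoc]
      · simp [h]

lemma pvRowA_eq (w : Int) (rest : List Int) :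
    pvRowA w rest =
    if w.toNat ≤ rest.length then some (rest.take w.toNat, rest.drop w.toNat) else none := by
  unfold pvRowA
  rw [rowA_fold]
  have : (PySem.List.pyRange 0 w 1).length = w.toNat := by
    rw [PySem.List.length_pyRange_one]; simp
  rw [this]
  split <;> simp

lemma layerA_fold (w : Int) (hw : 0 < w) (l : List Int) : ∀ (layer : List (List Int)) (rest : List Int),
    l.foldl
      (fun st _ =>
        match st with
        | none => none
        | some (layer, rem) =>
          match pvRowA w rem with
          | none => none
          | some (row, rem') => some (layer ++ [row], rem'))
      (some (layer, rest)) =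
    if l.length * w.toNat ≤ rest.length then
      some (layer ++ rowsC w.toNat l.length rest, rest.drop (l.length * w.toNat))
    else none := by
  have hw1 : 1 ≤ w.toNat := by omega
  induction l with
  | nil => intro layer rest; simp [rowsC]
  | cons a l ih =>
    intro layer rest
    simp only [List.foldl]
    rw [pvRowA_eq]
    have hmul : (a :: l).length * w.toNat = l.length * w.toNat + w.toNat := by
      simp [Nat.succ_mul]
    by_cases hrow : w.toNat ≤ rest.length
    · simp only [hrow, if_true]
      rw [ih]
      have h2 : (rest.drop w.toNat).length = rest.length - w.toNat := by simp
      rw [h2, hmul]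
      by_cases h : l.length * w.toNat ≤ rest.length - w.toNat
      · have h1 : l.length * w.toNat + w.toNat ≤ rest.length := by omega
        simp only [h, if_true, h1, if_true, List.length_cons, rowsC,
          List.append_assoc, List.drop_drop, List.singleton_append]
        rw [Nat.add_comm]
      · have h1 : ¬ l.length * w.toNat + w.toNat ≤ rest.length := by omega
        simp [h, h1]
    · simp only [hrow, if_false]
      rw [rowFold_none _ (fun a => rfl)]
      rw [if_neg (by rw [hmul]; omega)]

lemma pvLayerA_eq (w h : Int) (hw : 0 < w) (rest : List Int) :
    pvLayerA w h rest =
    if h.toNat * w.toNat ≤ rest.length then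
      some (rowsC w.toNat h.toNat rest, rest.drop (h.toNat * w.toNat))
    else none := by
  unfold pvLayerA
  rw [layerA_fold w hw]
  have : (PySem.List.pyRange 0 h 1).length = h.toNat := by
    rw [PySem.List.length_pyRange_one]; simp
  rw [this]
  split <;> simp

lemma pvLoopA_eq (w h : Int) (hw : 0 < w) (hh : 0 < h) :
    ∀ (k fuel : Nat) (rest : List Int) (acc : List (List (List Int))),
    rest.length = k * (w.toNat * h.toNat) → k < fuel →
    pvLoopA fuel w h rest acc = acc ++ chunksC w.toNat h.toNat k rest := by
  intro k
  induction k with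
  | zero =>
    intro fuel rest acc hlen hfuel
    obtain ⟨f, rfl⟩ : ∃ f, fuel = f + 1 := ⟨fuel - 1, by omega⟩
    have hrest : rest = [] := by
      cases rest with
      | nil => rfl
      | cons x xs => simp at hlen
    subst hrest
    simp only [pvLoopA, pvLayerA_eq w h hw]
    have hpos : 0 < h.toNat * w.toNat := Nat.mul_pos (by omega) (by omega)
    rw [if_neg (by simp only [List.length_nil]; omega)]
    simp [chunksC]
  | succ k ih =>
    intro fuel rest acc hlen hfuel
    obtain ⟨f, rfl⟩ : ∃ f, fuel = f + 1 := ⟨fuel - 1, by omega⟩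
    simp only [pvLoopA, pvLayerA_eq w h hw]
    have hcomm : h.toNat * w.toNat = w.toNat * h.toNat := Nat.mul_comm _ _
    have hexp : (k + 1) * (w.toNat * h.toNat) = k * (w.toNat * h.toNat) + w.toNat * h.toNat := by
      ring
    have hle : h.toNat * w.toNat ≤ rest.length := by rw [hlen, hexp, hcomm]; omega
    simp only [hle, if_true]
    rw [ih f (rest.drop (h.toNat * w.toNat)) (acc ++ [rowsC w.toNat h.toNat rest])
        (by simp only [List.length_drop, hlen, hexp, hcomm]; omega) (by omega)]
    simp [chunksC, hcomm]

lemma rowsC_map (wn : Nat) : ∀ (hn : Nat) (rest : List Int),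
    rowsC wn hn rest = (List.range hn).map (fun r => (rest.drop (r * wn)).take wn) := by
  intro hn
  induction hn with
  | zero => intro rest; simp [rowsC]
  | succ hh ih =>
    intro rest
    rw [List.range_succ_eq_map, List.map_cons, List.map_map]
    simp only [rowsC, ih]
    refine congrArg₂ _ (by simp) ?_
    apply List.map_congr_left
    intro r _
    simp only [Function.comp, List.drop_drop]
    congr 2
    simp only [Nat.succ_eq_add_one]
    ring

lemma chunksC_map (wn hn : Nat) (code : List Int) : ∀ (k off : Nat),
    chunksC wn hn k (code.drop off) =
    (List.range k).map (fun l =>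
      (List.range hn).map (fun r => (code.drop (off + l * (wn * hn) + r * wn)).take wn)) := by
  intro k
  induction k with
  | zero => intro off; simp [chunksC]
  | succ kk ih =>
    intro off
    rw [List.range_succ_eq_map, List.map_cons, List.map_map]
    simp only [chunksC]
    refine congrArg₂ _ ?_ ?_
    · rw [rowsC_map]
      apply List.map_congr_left
      intro r _
      simp only [List.drop_drop]
      congr 2
      ring
    · rw [show List.drop (wn * hn) (List.drop off code) = List.drop (off + wn * hn) code from by
        rw [List.drop_drop, Nat.add_comm], ih]
      apply List.map_congr_left
      intro l _
      apply List.map_congr_left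
      intro r _
      congr 3
      simp only [Nat.succ_eq_add_one]
      ring

-- ===== VERDICT (by name: the statement is the Claim_ definition above) =====
theorem read_layers_spec : Claim_equal_read_layers := by
  intro dims code _ hpre
  obtain ⟨hw, hh, hmod⟩ := hpre
  unfold Spec_read_layers read_layers read_layers_alt
  have hwn : ((dims.1.toNat : Int)) = dims.1 := Int.toNat_of_nonneg hw.le
  have hhn : ((dims.2.toNat : Int)) = dims.2 := Int.toNat_of_nonneg hh.le
  have hpos : 0 < dims.1.toNat * dims.2.toNat := Nat.mul_pos (by omega) (by omega)
  have hdvd : (dims.1 * dims.2) ∣ (code.length : Int) :=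
    (PySem.Int.mod_eq_zero_iff_dvd _ _).mp hmod
  have hdvdN : (dims.1.toNat * dims.2.toNat) ∣ code.length := by
    have h1 : ((dims.1.toNat * dims.2.toNat : Nat) : Int) ∣ (code.length : Int) := by
      push_cast [hwn, hhn]; exact hdvd
    exact_mod_cast h1
  obtain ⟨k, hk⟩ := hdvdN
  have hklen : k ≤ code.length := by
    calc k = 1 * k := (Nat.one_mul k).symm
    _ ≤ dims.1.toNat * dims.2.toNat * k := Nat.mul_le_mul_right k hpos
    _ = code.length := hk.symm
  rw [pvLoopA_eq dims.1 dims.2 hw hh k (code.length + 1) code []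
      (by rw [hk]; ring) (by omega)]
  rw [List.nil_append]
  have hnum : PySem.Int.floordiv (code.length : Int) (dims.1 * dims.2) = (k : Int) := by
    rw [show dims.1 * dims.2 = ((dims.1.toNat * dims.2.toNat : Nat) : Int) from by
      push_cast [hwn, hhn]; ring]
    rw [PySem.Int.floordiv_natCast, hk, Nat.mul_div_cancel_left _ hpos]
  dsimp only
  rw [hnum]
  rw [PySem.List.pyRange_one 0 (k : Int), PySem.List.pyRange_one 0 dims.2]
  rw [show ((k : Int) - 0).toNat = k from by omega,
      show (dims.2 - 0).toNat = dims.2.toNat from by omega]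
  have hchunks : chunksC dims.1.toNat dims.2.toNat k code =
      (List.range k).map (fun l =>
        (List.range dims.2.toNat).map (fun r =>
          (code.drop (l * (dims.1.toNat * dims.2.toNat) + r * dims.1.toNat)).take dims.1.toNat)) := by
    have h0 := chunksC_map dims.1.toNat dims.2.toNat code k 0
    simpa using h0
  rw [hchunks, List.map_map]
  apply List.map_congr_left
  intro l _
  simp only [Function.comp]
  rw [List.map_map]
  apply List.map_congr_left
  intro r _
  simp only [Function.comp]
  have ha : (0 + (l : Int)) * (dims.1 * dims.2) + (0 + (r : Int)) * dims.1 =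
      ((l * (dims.1.toNat * dims.2.toNat) + r * dims.1.toNat : Nat) : Int) := by
    push_cast [hwn, hhn]; ring
  have hb : ((l * (dims.1.toNat * dims.2.toNat) + r * dims.1.toNat : Nat) : Int) + dims.1 =
      ((l * (dims.1.toNat * dims.2.toNat) + r * dims.1.toNat + dims.1.toNat : Nat) : Int) := by
    push_cast [hwn]; ring
  rw [ha, hb, PySem.List.slice_toNat code (Int.natCast_nonneg _) (Int.natCast_nonneg _)]
  simp only [Int.toNat_natCast]
  congr 2
  omega
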